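-- pv_equiv track=rewrite | github.com/Atoqaz/groovy-tunes-minecraft | verifier.py | get_line_sum
-- ===== SOURCE A (Python) =====
-- def get_line_sum(line, pause_amount):
--     location = line.find("+=") + 4
--     line = line[location:-2]
--     sum = 0
--     for char in line:
--         if char in pause_amount:
--             sum += pause_amount[char]
--     return sum
-- ===== SOURCE B (Python) =====
-- def get_line_sum(line, pause_amount):
--     location = line.find("+=") + 4
--     sub = line[location:-2]
--     counts = {}
--     for ch in sub:
--         counts[ch] = counts.get(ch, 0) + 1
--     return sum(counts.get(c, 0) * v for c, v in pause_amount.items())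
-- ===== Notes on version B (the rewrite author's own statement) =====
-- stated objective: alternative
-- what changed: B builds a character frequency table of the sliced substring in one pass and then sums count*value over the dict's entries, instead of A's per-character dict membership test and lookup.
import Mathlib
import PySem

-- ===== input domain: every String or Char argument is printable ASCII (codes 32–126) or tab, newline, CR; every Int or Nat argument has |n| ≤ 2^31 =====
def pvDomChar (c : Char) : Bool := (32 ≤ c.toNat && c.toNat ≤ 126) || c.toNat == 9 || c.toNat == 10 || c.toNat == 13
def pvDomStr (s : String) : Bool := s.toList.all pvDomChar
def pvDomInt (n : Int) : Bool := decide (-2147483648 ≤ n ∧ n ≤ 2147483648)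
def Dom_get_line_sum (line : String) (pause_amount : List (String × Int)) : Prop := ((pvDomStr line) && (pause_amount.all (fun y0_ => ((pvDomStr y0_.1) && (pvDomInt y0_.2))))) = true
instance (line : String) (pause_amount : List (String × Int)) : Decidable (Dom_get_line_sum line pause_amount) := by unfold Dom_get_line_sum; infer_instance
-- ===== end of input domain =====

-- B replaces A's per-character dict membership/lookup loop with a frequency table of the
-- substring summed against the dict's entries (alternative decomposition, same result).


-- ===== PORT A =====
def get_line_sum (line : String) (pause_amount : List (String × Int)) : Int :=
  let location : Int := PySem.Str.find line "+=" + 4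
  let line2 : String := PySem.Str.slice line (some location) (some (-2))
  -- 'if char in pause_amount: sum += pause_amount[char]' — membership then subscript on the
  -- dict is one first-match lookup on the association list (the KeyError branch is unreachable)
  line2.toList.foldl (fun s char =>
    match pause_amount.lookup (String.ofList [char]) with
    | some v => s + v
    | none => s) 0

-- ===== PORT B =====
def get_line_sum_alt (line : String) (pause_amount : List (String × Int)) : Int :=
  let location : Int := PySem.Str.find line "+=" + 4
  let sub : String := PySem.Str.slice line (some location) (some (-2))
  -- counts[ch] = counts.get(ch, 0) + 1 over the substring's characters (a Char-keyed dict)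
  let counts : PySem.Dict Char Int :=
    sub.toList.foldl (fun d ch => d.insert ch (d.getD ch 0 + 1)) PySem.Dict.empty
  -- sum(counts.get(c, 0) * v for c, v in pause_amount.items()); counts is keyed by single
  -- characters, so counts.get(c, 0) is 0 unless the key c is a one-character string
  (pause_amount.map (fun kv =>
    (match kv.1.toList with
     | [c] => counts.getD c 0
     | _ => 0) * kv.2)).sum

-- ===== PRECONDITION & SPEC =====
-- Pre_ excludes association lists with duplicate keys: they do not arise from a Python dict
-- (both Pythons receive the already-collapsed dict and agree there), so which entry the
-- assoc-list models is ambiguous — a defensible-corner exclusion, not a behaviour of A.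
def Pre_get_line_sum (line : String) (pause_amount : List (String × Int)) : Prop :=
  (pause_amount.map Prod.fst).Nodup
instance (line : String) (pause_amount : List (String × Int)) : Decidable (Pre_get_line_sum line pause_amount) := by unfold Pre_get_line_sum; infer_instance

def pvWitness_get_line_sum : String × (List (String × Int)) :=
  ("wait += a b)\n", [("a", 2), (" ", 1), ("ab", 7)])

def Spec_get_line_sum (line : String) (pause_amount : List (String × Int)) (out : Int) : Prop := out = get_line_sum_alt line pause_amount
instance (line : String) (pause_amount : List (String × Int)) (out : Int) : Decidable (Spec_get_line_sum line pause_amount out) := by unfold Spec_get_line_sum; infer_instance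

-- ===== CLAIM (what is proved, stated in full; the proofs are below) =====
def Claim_equal_get_line_sum : Prop := ∀ (line : String) (pause_amount : List (String × Int)), Dom_get_line_sum line pause_amount → Pre_get_line_sum line pause_amount → Spec_get_line_sum line pause_amount (get_line_sum line pause_amount)

-- ===== LEMMAS AND PROOFS =====

-- B's hand-written counting loop is collections.Counter's fold (insert k (getD k 0 + 1) is
-- definitionally modify k 0 (+1)), so its lookups are list counts
theorem counts_getD (L : List Char) (c : Char) :
    (L.foldl (fun d ch => d.insert ch (d.getD ch 0 + 1)) PySem.Dict.empty).getD c 0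
      = (L.count c : Int) := by
  have h : (fun (d : PySem.Dict Char Int) ch => d.insert ch (d.getD ch 0 + 1))
      = (fun d x => d.modify x 0 (· + 1)) := rfl
  rw [h, ← PySem.Dict.counter_eq_foldl, PySem.Dict.getD_counter]

-- under Nodup keys, the indicator sum over the entries is the first-match lookup
theorem sum_indicator_eq_lookup (pa : List (String × Int)) (h : (pa.map Prod.fst).Nodup) (c : Char) :
    (pa.map (fun kv => if kv.1.toList = [c] then kv.2 else 0)).sum
      = (match pa.lookup (String.ofList [c]) with | some v => v | none => 0) := by
  induction pa with
  | nil => simp [List.lookup]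
  | cons kv t ih =>
    simp only [List.map_cons, List.nodup_cons, List.mem_map] at h
    obtain ⟨hnot, hnd⟩ := h
    by_cases hk : kv.1.toList = [c]
    · have hkeq : kv.1 = String.ofList [c] := by
        apply String.toList_inj.mp; simp [hk]
      have hz : (t.map (fun kv => if kv.1.toList = [c] then kv.2 else 0)).sum = 0 := by
        apply List.sum_eq_zero
        intro x hx
        simp only [List.mem_map] at hx
        obtain ⟨kv', hkv', rfl⟩ := hx
        have : kv'.1.toList ≠ [c] := by
          intro hc
          exact hnot ⟨kv', hkv', String.toList_inj.mp (by rw [hc, hk])⟩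
        simp [this]
      simp [List.lookup, hkeq, hz]
    · have hne : (String.ofList [c] == kv.1) = false := by
        apply beq_eq_false_iff_ne.mpr
        intro hc; exact hk (by simp [← hc])
      simp [List.lookup, hk, hne, ih hnd]

-- double counting: summing count(c)·v over the entries equals summing the looked-up value
-- over the characters
theorem main_sum (pa : List (String × Int)) (h : (pa.map Prod.fst).Nodup) (L : List Char) :
    (pa.map (fun kv =>
        (match kv.1.toList with | [c] => (L.count c : Int) | _ => 0) * kv.2)).sum
      = (L.map (fun ch =>
          match pa.lookup (String.ofList [ch]) with | some v => v | none => 0)).sum := by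
  induction L with
  | nil =>
    simp only [List.map_nil, List.sum_nil]
    apply List.sum_eq_zero
    intro x hx
    simp only [List.mem_map] at hx
    obtain ⟨kv, _, rfl⟩ := hx
    rcases hl : kv.1.toList with _ | ⟨c, _ | ⟨c', cs⟩⟩ <;> simp
  | cons ch t ih =>
    have hsplit : (fun (kv : String × Int) =>
          (match kv.1.toList with | [c] => ((ch :: t).count c : Int) | _ => 0) * kv.2)
        = fun kv => (match kv.1.toList with | [c] => (t.count c : Int) | _ => 0) * kv.2
            + (if kv.1.toList = [ch] then kv.2 else 0) := by
      funext kv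
      rcases hl : kv.1.toList with _ | ⟨c, _ | ⟨cq, cs⟩⟩ <;> simp [List.count_cons]
      by_cases hc : ch = c
      · subst hc; simp [add_mul]
      · rw [if_neg hc, if_neg (fun hcc : c = ch => hc hcc.symm)]
        ring
    rw [hsplit, PySem.List.sum_map_add_int, ih, sum_indicator_eq_lookup pa h ch]
    simp only [List.map_cons, List.sum_cons]
    exact add_comm _ _

theorem get_line_sum_eq_alt (line : String) (pa : List (String × Int))
    (hpre : (pa.map Prod.fst).Nodup) : get_line_sum line pa = get_line_sum_alt line pa := by
  unfold get_line_sum get_line_sum_alt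
  dsimp only
  set L := (PySem.Str.slice line (some (PySem.Str.find line "+=" + 4)) (some (-2))).toList with hL
  have hfold : (fun (s : Int) char =>
        match pa.lookup (String.ofList [char]) with
        | some v => s + v
        | none => s)
      = fun s char => s + (match pa.lookup (String.ofList [char]) with
        | some v => v | none => 0) := by
    funext s char
    cases pa.lookup (String.ofList [char]) <;> simp
  rw [hfold, PySem.List.foldl_add, zero_add]
  have hcounts : (fun (kv : String × Int) =>
        (match kv.1.toList with
         | [c] => (L.foldl (fun d ch => d.insert ch (d.getD ch 0 + 1)) PySem.Dict.empty).getD c 0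
         | _ => 0) * kv.2)
      = fun kv => (match kv.1.toList with | [c] => (L.count c : Int) | _ => 0) * kv.2 := by
    funext kv
    rcases kv.1.toList with _ | ⟨c, _ | ⟨c', cs⟩⟩ <;> simp [counts_getD]
  rw [hcounts, main_sum pa hpre L]

-- ===== VERDICT (by name: the statement is the Claim_ definition above) =====
theorem get_line_sum_spec : Claim_equal_get_line_sum := by
  intro line pa _ hpre
  unfold Spec_get_line_sum
  exact get_line_sum_eq_alt line pa hpre
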